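-- pv_equiv track=rewrite | github.com/ManhNgocNguyen/Thuat-Toan-ATTT | addtion_in_fp.py | numb_to_arr
-- ===== SOURCE A (Python) =====
-- import math
-- import math
--
-- def numb_to_arr(a, p, w):
--     array = []
--     m = math.ceil(math.log2(p))
--     t = math.ceil(m / w)
--     while t >= 1:
--         arr = a // pow(2, w * (t - 1))
--         a = a % pow(2, w * (t - 1))
--         array.append(arr)
--         if t == 1:
--             return array
--         t -= 1
-- ===== SOURCE B (Python) =====
-- import math
--
-- def numb_to_arr(a, p, w):
--     m = math.ceil(math.log2(p))
--     t = math.ceil(m / w)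
--     if t < 1:
--         return None
--     words = []
--     for _ in range(t - 1):
--         words.append(a % (1 << w))
--         a >>= w
--     words.append(a)
--     words.reverse()
--     return words
-- ===== Notes on version B (the rewrite author's own statement) =====
-- stated objective: alternative
-- what changed: B extracts words least-significant-first with mask-and-shift (a % (1<<w); a >>= w) and reverses at the end, instead of A's MSB-first repeated floor-division by a freshly recomputed pow(2, w*(t-1)) with an append-and-return-inside-the-loop control flow.
-- outside the precondition, e.g. on numb_to_arr(3, 1, 8): A returns None, B returns None; on numb_to_arr(3, 5, 0): A raises ZeroDivisionError, B raises ZeroDivisionError; on numb_to_arr(3, 0, 8): A raises ValueError, B raises ValueError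
import Mathlib
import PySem

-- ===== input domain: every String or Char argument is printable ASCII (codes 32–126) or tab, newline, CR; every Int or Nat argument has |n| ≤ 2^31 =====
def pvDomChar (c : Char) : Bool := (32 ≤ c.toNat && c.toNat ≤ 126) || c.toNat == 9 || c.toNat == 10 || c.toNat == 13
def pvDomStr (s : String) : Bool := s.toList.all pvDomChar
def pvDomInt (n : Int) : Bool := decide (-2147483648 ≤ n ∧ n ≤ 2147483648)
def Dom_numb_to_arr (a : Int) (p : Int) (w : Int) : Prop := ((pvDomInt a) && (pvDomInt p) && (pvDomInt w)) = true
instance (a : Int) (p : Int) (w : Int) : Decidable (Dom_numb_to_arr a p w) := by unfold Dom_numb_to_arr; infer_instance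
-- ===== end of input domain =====

-- B extracts the words LSB-first by mask-and-shift and reverses at the end (alternative decomposition; same return value on Pre_).

-- ===== PORT A =====
-- math.ceil(math.log2 p): exact for 1 ≤ p ≤ 2^31 (the float log2 error is far below the distance to the next integer there); Python raises ValueError for p ≤ 0 (outside Pre_).
def pyCeilLog2 (p : Int) : Int := (PySem.Int.bitLength (p - 1) : Int)
-- math.ceil(m / w): exact for ints with |m|,|w| ≤ 2^31, w ≠ 0 (ceil(m/w) = -((-m)//w); the float division error is below the distance to the next integer); w = 0 raises ZeroDivisionError (outside Pre_).
def pyCeilDiv (m : Int) (w : Int) : Int := -(PySem.Int.floordiv (-m) w)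

-- A's while loop; fuel = initial t bounds the iteration count (the loop runs exactly t times under Pre_).
-- pow(2, w*(t-1)) ported as 2 ^ (w*(t-1)).toNat: exact since the exponent is ≥ 0 whenever t ≥ 1 and w ≥ 1 (Pre_).
def numb_to_arr_loop (w : Int) : Int → Int → List Int → Nat → List Int
  | _, _, array, 0 => array      -- not reached under Pre_
  | a, t, array, Nat.succ fuel =>
    if t ≥ 1 then
      let arr := PySem.Int.floordiv a (2 ^ (w * (t - 1)).toNat)
      let a' := PySem.Int.mod a (2 ^ (w * (t - 1)).toNat)
      let array' := array ++ [arr]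
      if t = 1 then array' else numb_to_arr_loop w a' (t - 1) array' fuel
    else array                   -- Python falls off the loop and returns None here (outside Pre_)

def numb_to_arr (a : Int) (p : Int) (w : Int) : List Int :=
  let m := pyCeilLog2 p
  let t := pyCeilDiv m w
  numb_to_arr_loop w a t [] t.toNat

-- ===== PORT B =====
-- the for-loop of B: appends a % (1 << w) and shifts a right by w, n times; returns (words, final a)
def numb_to_arr_alt_iter (w : Int) : Int → List Int → Nat → List Int × Int
  | a, words, 0 => (words, a)
  | a, words, Nat.succ n =>
      numb_to_arr_alt_iter w (a >>> w.toNat) (words ++ [PySem.Int.mod a ((1:Int) <<< w.toNat)]) n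

def numb_to_arr_alt (a : Int) (p : Int) (w : Int) : List Int :=
  let m := pyCeilLog2 p
  let t := pyCeilDiv m w
  if t < 1 then []               -- Python B returns None here (outside Pre_)
  else
    let r := numb_to_arr_alt_iter w a [] (t - 1).toNat
    (r.1 ++ [r.2]).reverse

-- ===== PRECONDITION & SPEC =====
-- Pre_ excludes p ≤ 1 (math.log2 raises ValueError for p ≤ 0; for p = 1 the loop bound t is 0 and A
-- returns None, not a list) and w ≤ 0 (w = 0 raises ZeroDivisionError; w < 0 gives t ≤ 0, hence None).
def Pre_numb_to_arr (a : Int) (p : Int) (w : Int) : Prop := 2 ≤ p ∧ 1 ≤ w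
instance (a : Int) (p : Int) (w : Int) : Decidable (Pre_numb_to_arr a p w) := by unfold Pre_numb_to_arr; infer_instance
def pvWitness_numb_to_arr : Int × Int × Int := (1234567, 1000003, 8)

def Spec_numb_to_arr (a : Int) (p : Int) (w : Int) (out : List Int) : Prop := out = numb_to_arr_alt a p w
instance (a : Int) (p : Int) (w : Int) (out : List Int) : Decidable (Spec_numb_to_arr a p w out) := by unfold Spec_numb_to_arr; infer_instance

-- ===== CLAIM (what is proved, stated in full; the proofs are below) =====
def Claim_equal_numb_to_arr : Prop := ∀ (a : Int) (p : Int) (w : Int), Dom_numb_to_arr a p w → Pre_numb_to_arr a p w → Spec_numb_to_arr a p w (numb_to_arr a p w)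

-- ===== LEMMAS AND PROOFS =====

-- pure MSB-first digit list: k+1 base-W digits of a, top digit unmasked
def msbDigits (W : Int) : Int → Nat → List Int
  | a, 0 => [a]
  | a, k+1 => (a / W ^ (k+1)) :: msbDigits W (a % W ^ (k+1)) k

-- pure LSB-first digit list: k+1 digits, last one unmasked
def lsbDigits (W : Int) : Int → Nat → List Int
  | a, 0 => [a]
  | a, k+1 => (a % W) :: lsbDigits W (a / W) k

theorem msbDigits_tail_split (W : Int) (hW : 0 < W) (k : Nat) :
    ∀ a : Int, msbDigits W a (k+1) = msbDigits W (a / W) k ++ [a % W] := by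
  induction k with
  | zero =>
      intro a
      simp [msbDigits, pow_one]
  | succ k ih =>
      intro a
      have hsplit : W ^ (k+2) = W * W ^ (k+1) := by ring
      -- (i) a / W^(k+2) = (a / W) / W^(k+1)
      have hi : a / W ^ (k+2) = a / W / W ^ (k+1) := by
        rw [Int.ediv_ediv_of_nonneg (le_of_lt hW), ← hsplit]
      -- (iii) (a % W^(k+2)) % W = a % W
      have hiii : (a % W ^ (k+2)) % W = a % W := by
        exact Int.emod_emod_of_dvd a ⟨W ^ (k+1), hsplit⟩
      -- (ii) (a % W^(k+2)) / W = (a / W) % W^(k+1)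
      have hii : (a % W ^ (k+2)) / W = (a / W) % W ^ (k+1) := by
        rw [Int.emod_def, hi, hsplit]
        have h2 : a - W * W ^ (k+1) * (a / W / W ^ (k+1))
            = a + W * (-(W ^ (k+1) * (a / W / W ^ (k+1)))) := by ring
        rw [h2, Int.add_mul_ediv_left _ _ (ne_of_gt hW), Int.emod_def]
        ring
      calc msbDigits W a (k+2)
          = (a / W ^ (k+2)) :: msbDigits W (a % W ^ (k+2)) (k+1) := rfl
        _ = (a / W ^ (k+2)) ::
              (msbDigits W ((a % W ^ (k+2)) / W) k ++ [(a % W ^ (k+2)) % W]) := by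
              rw [ih]
        _ = msbDigits W (a / W) (k+2-1) ++ [a % W] := by
              rw [hi, hii, hiii]; rfl

theorem msbDigits_eq_reverse_lsb (W : Int) (hW : 0 < W) (k : Nat) :
    ∀ a : Int, msbDigits W a k = (lsbDigits W a k).reverse := by
  induction k with
  | zero => intro a; rfl
  | succ k ih =>
      intro a
      rw [msbDigits_tail_split W hW k a, ih]
      simp [lsbDigits]

-- one unfolding of A's loop at t = 1: append the unmasked remainder and return
theorem loop_one (w a : Int) (array : List Int) (fuel : Nat) :
    numb_to_arr_loop w a 1 array (fuel+1) = array ++ [a] := by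
  simp [numb_to_arr_loop]

-- one unfolding of A's loop at t ≥ 2
theorem loop_step (w a t : Int) (array : List Int) (fuel : Nat) (h1 : t ≥ 1) (h2 : t ≠ 1) :
    numb_to_arr_loop w a t array (fuel+1)
      = numb_to_arr_loop w (PySem.Int.mod a (2 ^ (w * (t - 1)).toNat)) (t - 1)
          (array ++ [PySem.Int.floordiv a (2 ^ (w * (t - 1)).toNat)]) fuel := by
  simp only [numb_to_arr_loop]
  rw [if_pos h1, if_neg h2]

-- A's loop computes the MSB-first digits (fuel k+1 with t = k+1 suffices)
theorem loopA_eq_msb (w : Int) (hw : 1 ≤ w) (k : Nat) :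
    ∀ (a : Int) (array : List Int),
      numb_to_arr_loop w a ((k : Int) + 1) array (k+1) = array ++ msbDigits (2 ^ w.toNat) a k := by
  induction k with
  | zero =>
      intro a array
      have h0 : ((0:Nat) : Int) + 1 = 1 := by norm_num
      rw [h0, loop_one]
      rfl
  | succ k ih =>
      intro a array
      have e1 : ((k+1:Nat) : Int) + 1 ≥ 1 := by push_cast; omega
      have e2 : ((k+1:Nat) : Int) + 1 ≠ 1 := by push_cast; omega
      rw [loop_step _ _ _ _ _ e1 e2]
      have e3 : ((k+1:Nat) : Int) + 1 - 1 = ((k:Nat) : Int) + 1 := by push_cast; ring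
      rw [e3, ih]
      have hwn : w = (w.toNat : Int) := (Int.toNat_of_nonneg (by omega)).symm
      have hexp : (w * (((k:Nat) : Int) + 1)).toNat = w.toNat * (k+1) := by
        have : w * (((k:Nat) : Int) + 1) = ((w.toNat * (k+1) : Nat) : Int) := by
          push_cast [← hwn]; ring
        rw [this, Int.toNat_natCast]
      have hWpos : (0:Int) < (2 ^ w.toNat) ^ (k+1) := pow_pos (by positivity) _
      rw [hexp, pow_mul, PySem.Int.floordiv_eq_ediv_of_pos hWpos, PySem.Int.mod_eq_emod_of_pos hWpos]
      simp [msbDigits]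

-- B's loop accumulates the LSB-first digits
theorem iterB_eq_lsb (w : Int) (k : Nat) :
    ∀ (a : Int) (words : List Int),
      (numb_to_arr_alt_iter w a words k).1 ++ [(numb_to_arr_alt_iter w a words k).2]
        = words ++ lsbDigits (2 ^ w.toNat) a k := by
  induction k with
  | zero => intro a words; simp [numb_to_arr_alt_iter, lsbDigits]
  | succ k ih =>
      intro a words
      have hWpos : (0:Int) < 2 ^ w.toNat := by positivity
      have hshl : (1:Int) <<< w.toNat = 2 ^ w.toNat := by
        rw [Int.shiftLeft_eq]; ring
      have hshr : a >>> w.toNat = a / 2 ^ w.toNat := by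
        rw [Int.shiftRight_eq_div_pow]; norm_cast
      have hm : PySem.Int.mod a ((1:Int) <<< w.toNat) = a % 2 ^ w.toNat := by
        rw [hshl]; exact PySem.Int.mod_eq_emod_of_pos hWpos
      simp only [numb_to_arr_alt_iter]
      rw [ih, hm, hshr]
      simp [lsbDigits]

-- ===== VERDICT (by name: the statement is the Claim_ definition above) =====
theorem numb_to_arr_spec : Claim_equal_numb_to_arr := by
  intro a p w _hdom hpre
  obtain ⟨hp, hw⟩ := hpre
  unfold Spec_numb_to_arr
  have hbl : PySem.Int.bitLength (p - 1) ≠ 0 := by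
    intro h0
    have h2 := PySem.Int.lt_two_pow_bitLength (p - 1)
    rw [h0, pow_zero] at h2
    omega
  have hm1 : 1 ≤ pyCeilLog2 p := by unfold pyCeilLog2; omega
  have hlt : PySem.Int.floordiv (-(pyCeilLog2 p)) w < 0 := by
    rw [PySem.Int.floordiv_lt_iff_lt_mul (show (0:Int) < w by omega), zero_mul]
    omega
  have ht1 : 1 ≤ pyCeilDiv (pyCeilLog2 p) w := by unfold pyCeilDiv; omega
  set T := pyCeilDiv (pyCeilLog2 p) w with hT
  show numb_to_arr_loop w a T [] T.toNat
      = if T < 1 then []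
        else ((numb_to_arr_alt_iter w a [] (T - 1).toNat).1
              ++ [(numb_to_arr_alt_iter w a [] (T - 1).toNat).2]).reverse
  rw [if_neg (by omega : ¬ T < 1)]
  obtain ⟨k, hk⟩ : ∃ k : Nat, T = (k : Int) + 1 := ⟨(T - 1).toNat, by omega⟩
  rw [hk, show ((k : Int) + 1).toNat = k + 1 from by omega,
      show ((k : Int) + 1 - 1).toNat = k from by omega]
  rw [loopA_eq_msb w hw k a [], iterB_eq_lsb w k a [],
      msbDigits_eq_reverse_lsb _ (by positivity) k a]
  simp
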